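-- pv_equiv track=rewrite | github.com/LooDaHu/Remote-File-Explorer | drive.py | div_path
-- ===== SOURCE A (Python) =====
-- def div_path(path):
--     seg_path = []
--     if path != '':
--         segment = path.split('\\')
--         temp_path = segment[0]+'\\'
--         temp = {
--             'path': temp_path,
--             'name': segment[0]
--         }
--         seg_path.append(temp)
--         for seg in segment[1:]:
--             temp_path = temp_path + seg
--             temp = {
--                 'path': temp_path,
--                 'name': seg
--             }
--             temp_path = temp_path + '\\'
--             seg_path.append(temp)
--     return seg_path
-- ===== SOURCE B (Python) =====
-- def div_path(path):
--     if path == '':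
--         return []
--     segment = path.split('\\')
--     return [{'path': '\\'.join(segment[:i + 1]) + ('\\' if i == 0 else ''),
--              'name': seg}
--             for i, seg in enumerate(segment)]
-- ===== Notes on version B (the rewrite author's own statement) =====
-- stated objective: simpler
-- what changed: Replaces A's running string accumulator carried through an explicit loop with a single split followed by a comprehension that recomputes each cumulative path directly as a join of the segment prefix.
import Mathlib
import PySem

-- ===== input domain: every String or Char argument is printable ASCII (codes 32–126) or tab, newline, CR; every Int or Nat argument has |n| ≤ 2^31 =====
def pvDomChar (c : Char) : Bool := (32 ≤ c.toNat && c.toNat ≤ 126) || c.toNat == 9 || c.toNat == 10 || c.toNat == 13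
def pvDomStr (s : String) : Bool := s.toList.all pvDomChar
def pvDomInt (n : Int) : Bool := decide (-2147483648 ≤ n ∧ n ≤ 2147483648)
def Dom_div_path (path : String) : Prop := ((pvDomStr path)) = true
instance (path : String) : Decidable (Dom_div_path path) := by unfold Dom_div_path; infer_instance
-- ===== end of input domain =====

-- B replaces A's running string accumulator with a single split plus a per-index
-- prefix join (objective: alternative decomposition, same cost).


-- ===== PORT A =====
-- strings are handled on the List Char side (PySem.Chars), exact for ASCII `+` and split
def div_path (path : String) : List (List (String × String)) :=
  if path ≠ "" then
    match PySem.Chars.splitOn path.toList ['\\'] with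
    | [] => []   -- unreachable (split never returns an empty list); totality guard only
    | s0 :: rest =>
      let tp0 := s0 ++ ['\\']
      let first := [("path", String.ofList tp0), ("name", String.ofList s0)]
      (rest.foldl
        (fun (st : List Char × List (List (String × String))) seg =>
          let tp' := st.1 ++ seg
          (tp' ++ ['\\'], st.2 ++ [[("path", String.ofList tp'), ("name", String.ofList seg)]]))
        (tp0, [first])).2
  else []

-- ===== PORT B =====
def div_path_alt (path : String) : List (List (String × String)) :=
  if path = "" then []
  else
    let segment := PySem.Chars.splitOn path.toList ['\\']
    (PySem.List.enumerate segment).map (fun is =>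
      let p := PySem.Chars.join ['\\'] (PySem.List.slice segment none (some (is.1 + 1))) ++
               (if is.1 = 0 then ['\\'] else [])
      [("path", String.ofList p), ("name", String.ofList is.2)])

-- ===== PRECONDITION & SPEC =====
def Spec_div_path (path : String) (out : List (List (String × String))) : Prop := out = div_path_alt path
instance (path : String) (out : List (List (String × String))) : Decidable (Spec_div_path path out) := by unfold Spec_div_path; infer_instance

-- ===== CLAIM (what is proved, stated in full; the proofs are below) =====
def Claim_equal_div_path : Prop := ∀ (path : String), Dom_div_path path → Spec_div_path path (div_path path)

-- ===== LEMMAS AND PROOFS =====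

-- the common reference list: entries over `rest`, given the already-consumed prefix `pre`
def pvEntries (pre : List (List Char)) : List (List Char) → List (List (String × String))
  | [] => []
  | s :: rest =>
      [("path", String.ofList (PySem.Chars.join ['\\'] (pre ++ [s]))),
       ("name", String.ofList s)] :: pvEntries (pre ++ [s]) rest

theorem pv_join_append_singleton (sep : List Char) (pre : List (List Char)) (s : List Char)
    (h : pre ≠ []) :
    PySem.Chars.join sep (pre ++ [s]) = PySem.Chars.join sep pre ++ sep ++ s := by
  induction pre with
  | nil => exact absurd rfl h
  | cons a pre ih =>
    cases pre with
    | nil =>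
      rw [show ([a] ++ [s] : List (List Char)) = [a, s] from rfl,
        PySem.Chars.join_cons_cons, PySem.Chars.join_singleton, PySem.Chars.join_singleton]
    | cons b pre =>
      rw [List.cons_append, List.cons_append, PySem.Chars.join_cons_cons,
        ← List.cons_append, ih (by simp), PySem.Chars.join_cons_cons]
      simp [List.append_assoc]

theorem pv_loopA (rest : List (List Char)) (pre : List (List Char)) (h : pre ≠ [])
    (out : List (List (String × String))) :
    (rest.foldl
        (fun (st : List Char × List (List (String × String))) seg =>
          let tp' := st.1 ++ seg
          (tp' ++ ['\\'], st.2 ++ [[("path", String.ofList tp'), ("name", String.ofList seg)]]))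
        (PySem.Chars.join ['\\'] pre ++ ['\\'], out)).2
      = out ++ pvEntries pre rest := by
  induction rest generalizing pre out with
  | nil => simp [pvEntries]
  | cons s rest ih =>
    have hjoin := pv_join_append_singleton ['\\'] pre s h
    simp only [List.foldl_cons]
    rw [← hjoin, ih (pre ++ [s]) (by simp), pvEntries]
    simp

theorem pv_loopB (segment : List (List Char)) (rest : List (List Char))
    (pre : List (List Char)) (h : pre ≠ []) (hseg : segment = pre ++ rest) :
    (PySem.List.enumerate rest (pre.length : Int)).map (fun is =>
        [("path", String.ofList (PySem.Chars.join ['\\']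
            (PySem.List.slice segment none (some (is.1 + 1))) ++
            (if is.1 = 0 then ['\\'] else []))),
         ("name", String.ofList is.2)])
      = pvEntries pre rest := by
  induction rest generalizing pre with
  | nil => simp [pvEntries]
  | cons s rest ih =>
    rw [PySem.List.enumerate_cons, List.map_cons, pvEntries]
    congr 1
    · have h1 : ((pre.length : Int) + 1) = ((pre.length + 1 : Nat) : Int) := by push_cast; ring
      have hsl : PySem.List.slice segment none (some ((pre.length : Int) + 1))
          = pre ++ [s] := by
        rw [h1, PySem.List.slice_to_natCast, hseg, List.take_append]
        simp
      simp [hsl]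
      exact h
    · have := ih (pre ++ [s]) (by simp) (by simp [hseg])
      rw [← this]
      congr 1
      simp

-- ===== VERDICT (by name: the statement is the Claim_ definition above) =====
theorem div_path_spec : Claim_equal_div_path := by
  intro path _
  unfold Spec_div_path
  by_cases hp : path = ""
  · simp [div_path, div_path_alt, hp]
  · cases hsplit : PySem.Chars.splitOn path.toList ['\\'] with
    | nil => simp [div_path, div_path_alt, hp, hsplit]
    | cons s0 rest =>
      simp only [div_path, div_path_alt, hp, hsplit, ne_eq, not_false_eq_true, if_true,
        if_false, PySem.List.enumerate_cons, List.map_cons, zero_add]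
      have hA := pv_loopA rest [s0] (by simp)
        [[("path", String.ofList (s0 ++ ['\\'])), ("name", String.ofList s0)]]
      have hB := pv_loopB (s0 :: rest) rest [s0] (by simp) (by simp)
      simp only [PySem.Chars.join_singleton] at hA
      simp only [List.length_singleton, Int.natCast_one] at hB
      rw [hA, hB]
      have hsl0 : PySem.List.slice (s0 :: rest) none (some 1) = [s0] := by
        rw [show (1:Int) = ((1 : Nat) : Int) by norm_num, PySem.List.slice_to_natCast]
        simp
      simp [hsl0, PySem.Chars.join_singleton]
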